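-- pv_equiv track=rewrite | github.com/m07takash/DigitalMATSUMOTO | DigiM_UrlFetch.py | _host_matches
-- ===== SOURCE A (Python) =====
-- def _host_matches(host, domains):
--     """host が domains のいずれかと一致、またはそのサブドメインなら True。"""
--     host = host.lower().lstrip(".")
--     for d in domains:
--         d = d.lower().lstrip(".")
--         if not d:
--             continue
--         if host == d or host.endswith("." + d):
--             return True
--     return False
-- ===== SOURCE B (Python) =====
-- def _host_matches(host, domains):
--     domain_set = {c for c in (d.lower().lstrip(".") for d in domains) if c}
--     parts = host.lower().lstrip(".").split(".")
--     return any(".".join(parts[i:]) in domain_set for i in range(len(parts)))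
-- ===== Notes on version B (the rewrite author's own statement) =====
-- stated objective: alternative
-- what changed: Instead of scanning the domain list and testing host==d or host.endswith('.'+d) per domain, B builds a set of cleaned domains once and checks each dot-suffix of the host (join of parts[i:]) for membership in that set.
import Mathlib
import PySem

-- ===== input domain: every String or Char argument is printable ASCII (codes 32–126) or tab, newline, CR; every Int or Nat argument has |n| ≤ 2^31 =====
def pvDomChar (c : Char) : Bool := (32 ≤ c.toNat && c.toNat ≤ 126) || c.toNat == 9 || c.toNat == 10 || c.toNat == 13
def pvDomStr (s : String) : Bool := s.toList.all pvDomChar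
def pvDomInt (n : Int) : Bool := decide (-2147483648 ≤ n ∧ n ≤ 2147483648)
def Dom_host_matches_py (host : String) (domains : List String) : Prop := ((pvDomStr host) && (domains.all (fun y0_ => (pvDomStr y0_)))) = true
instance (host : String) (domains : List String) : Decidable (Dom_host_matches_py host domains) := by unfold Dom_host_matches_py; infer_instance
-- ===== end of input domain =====

-- B replaces A's per-domain scan (host == d or host.endswith('.'+d)) with one set of
-- cleaned domains queried with every dot-suffix of the host: an alternative algorithm.


-- ===== PORT A =====
-- s.lower().lstrip(".") — lstrip(".") is ported by hand as dropWhile (· == '.'),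
-- which is exact: Python removes exactly the maximal leading run of '.' characters.
def pvClean (s : String) : List Char :=
  (PySem.Chars.lower s.toList).dropWhile (· == '.')

-- the 'for d in domains' loop of A, on the already-cleaned host h
def pvLoopA (h : List Char) : List String → Bool
  | [] => false
  | d :: rest =>
      let c := pvClean d
      if c = [] then pvLoopA h rest
      else if h == c || PySem.Chars.endswith h ('.' :: c) then true
      else pvLoopA h rest

def host_matches_py (host : String) (domains : List String) : Bool :=
  pvLoopA (pvClean host) domains

-- ===== PORT B =====
def host_matches_py_alt (host : String) (domains : List String) : Bool :=
  let dset : PySem.Set (List Char) :=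
    PySem.Set.ofList ((domains.map pvClean).filter (fun c => !(c = [])))
  let parts := PySem.Chars.splitOn (pvClean host) ['.']
  (List.range parts.length).any
    (fun i => PySem.Set.contains dset (PySem.Chars.join ['.'] (parts.drop i)))

-- ===== PRECONDITION & SPEC =====
def Spec_host_matches_py (host : String) (domains : List String) (out : Bool) : Prop := out = host_matches_py_alt host domains
instance (host : String) (domains : List String) (out : Bool) : Decidable (Spec_host_matches_py host domains out) := by unfold Spec_host_matches_py; infer_instance

-- ===== CLAIM (what is proved, stated in full; the proofs are below) =====
def Claim_equal_host_matches_py : Prop := ∀ (host : String) (domains : List String), Dom_host_matches_py host domains → Spec_host_matches_py host domains (host_matches_py host domains)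

-- ===== LEMMAS AND PROOFS =====

def splitDot : List Char → List Char × List (List Char)
  | [] => ([], [])
  | c :: rest =>
      if c = '.' then ([], (splitDot rest).1 :: (splitDot rest).2)
      else (c :: (splitDot rest).1, (splitDot rest).2)

theorem splitOn_go_eq_splitDot (fuel : Nat) (l cur : List Char) (acc : List (List Char))
    (h : l.length < fuel) :
    PySem.Chars.splitOn.go ['.'] fuel l cur acc
      = acc.reverse ++ (cur.reverse ++ (splitDot l).1) :: (splitDot l).2 := by
  induction fuel generalizing l cur acc with
  | zero => omega
  | succ n ih =>
    cases l with
    | nil => simp [PySem.Chars.splitOn.go, splitDot]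
    | cons c rest =>
      by_cases hc : c = '.'
      · subst hc
        rw [PySem.Chars.splitOn.go]
        have : (['.'] : List Char).isPrefixOf ('.' :: rest) = true := by
          simp [List.isPrefixOf]
        rw [if_pos this]
        rw [ih _ _ _ (by simpa using Nat.lt_of_succ_lt_succ h)]
        simp [splitDot]
      · rw [PySem.Chars.splitOn.go]
        have : (['.'] : List Char).isPrefixOf (c :: rest) = false := by
          simp [List.isPrefixOf]
          exact fun hcc => hc (by simpa using hcc.symm)
        rw [if_neg (by simp [this])]
        rw [ih _ _ _ (by simpa using Nat.lt_of_succ_lt_succ h)]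
        simp [splitDot, hc]

theorem splitOn_eq_splitDot (cs : List Char) :
    PySem.Chars.splitOn cs ['.'] = (splitDot cs).1 :: (splitDot cs).2 := by
  rw [PySem.Chars.splitOn, splitOn_go_eq_splitDot _ _ _ _ (by omega)]
  simp

theorem join_splitDot (cs : List Char) :
    PySem.Chars.join ['.'] ((splitDot cs).1 :: (splitDot cs).2) = cs := by
  induction cs with
  | nil => exact PySem.Chars.join_singleton ['.'] []
  | cons c rest ih =>
    by_cases hc : c = '.'
    · subst hc
      have hs : splitDot ('.' :: rest) = ([], (splitDot rest).1 :: (splitDot rest).2) := by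
        simp [splitDot]
      rw [hs]
      rw [PySem.Chars.join_cons_cons, ih]
      simp
    · have hs : splitDot (c :: rest) = (c :: (splitDot rest).1, (splitDot rest).2) := by
        simp [splitDot, hc]
      rw [hs]
      cases hr : (splitDot rest).2 with
      | nil =>
        rw [hr] at ih
        rw [PySem.Chars.join_singleton] at ih ⊢
        simp [ih]
      | cons p ps =>
        rw [hr] at ih
        rw [PySem.Chars.join_cons_cons] at ih ⊢
        simp [ih]

theorem suffix_iff_splitDot (cs t : List Char) :
    ('.' :: t) <:+ cs ↔
      ∃ j, j < (splitDot cs).2.length ∧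
        PySem.Chars.join ['.'] ((splitDot cs).2.drop j) = t := by
  induction cs generalizing t with
  | nil =>
    simp [splitDot]
  | cons c rest ih =>
    by_cases hc : c = '.'
    · subst hc
      have hs : (splitDot ('.' :: rest)).2 = (splitDot rest).1 :: (splitDot rest).2 := by
        simp [splitDot]
      rw [hs, List.suffix_cons_iff]
      constructor
      · rintro (heq | hsuf)
        · exact ⟨0, by simp, by simpa [join_splitDot] using (List.cons.injEq .. ▸ heq).2.symm⟩
        · obtain ⟨j, hj, hje⟩ := (ih t).mp hsuf
          exact ⟨j + 1, by simpa using hj, by simpa using hje⟩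
      · rintro ⟨j, hj, hje⟩
        cases j with
        | zero =>
          left
          simp at hje
          rw [join_splitDot] at hje
          rw [hje]
        | succ k =>
          right
          exact (ih t).mpr ⟨k, by simpa using hj, by simpa using hje⟩
    · have hs : (splitDot (c :: rest)).2 = (splitDot rest).2 := by
        simp [splitDot, hc]
      rw [hs, List.suffix_cons_iff, ← ih t]
      have : ¬ ('.' :: t = c :: rest) := by
        intro h; exact hc (by injection h with h1 _; exact h1.symm)
      tauto

theorem cand_iff (cs t : List Char) :
    (cs = t ∨ ('.' :: t) <:+ cs) ↔
      ∃ i, i < (PySem.Chars.splitOn cs ['.']).length ∧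
        PySem.Chars.join ['.'] ((PySem.Chars.splitOn cs ['.']).drop i) = t := by
  rw [splitOn_eq_splitDot, suffix_iff_splitDot]
  constructor
  · rintro (heq | ⟨j, hj, hje⟩)
    · exact ⟨0, by simp, by simpa [join_splitDot] using heq⟩
    · exact ⟨j + 1, by simpa using hj, by simpa using hje⟩
  · rintro ⟨i, hi, hie⟩
    cases i with
    | zero =>
      left
      simp at hie
      rw [join_splitDot] at hie
      exact hie
    | succ k =>
      right
      exact ⟨k, by simpa using hi, by simpa using hie⟩

theorem loopA_iff (h : List Char) (domains : List String) :
    pvLoopA h domains = true ↔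
      ∃ d ∈ domains, pvClean d ≠ [] ∧ (h = pvClean d ∨ ('.' :: pvClean d) <:+ h) := by
  induction domains with
  | nil => simp [pvLoopA]
  | cons d rest ih =>
    rw [pvLoopA]
    by_cases hc : pvClean d = []
    · rw [if_pos (by simp [hc])]
      rw [ih]
      simp [hc]
    · rw [if_neg hc]
      by_cases hm : (h == pvClean d || PySem.Chars.endswith h ('.' :: pvClean d)) = true
      · rw [if_pos hm]
        simp only [Bool.or_eq_true, beq_iff_eq, PySem.Chars.endswith_iff] at hm
        simp only [true_iff]
        exact ⟨d, by simp, hc, hm⟩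
      · rw [if_neg hm, ih]
        simp only [Bool.or_eq_true, beq_iff_eq, PySem.Chars.endswith_iff] at hm
        push Not at hm
        constructor
        · rintro ⟨e, he, hne, hp⟩
          exact ⟨e, by simp [he], hne, hp⟩
        · rintro ⟨e, he, hne, hp⟩
          rcases List.mem_cons.mp he with rfl | he'
          · rcases hp with hp | hp
            · exact absurd hp hm.1
            · exact absurd hp hm.2
          · exact ⟨e, he', hne, hp⟩

theorem altB_iff (host : String) (domains : List String) :
    host_matches_py_alt host domains = true ↔
      ∃ d ∈ domains, pvClean d ≠ [] ∧
        ∃ i, i < (PySem.Chars.splitOn (pvClean host) ['.']).length ∧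
          PySem.Chars.join ['.'] ((PySem.Chars.splitOn (pvClean host) ['.']).drop i) = pvClean d := by
  unfold host_matches_py_alt
  simp only [List.any_eq_true, List.mem_range, PySem.Set.contains_iff, PySem.Set.mem_ofList,
    List.mem_filter, List.mem_map]
  constructor
  · rintro ⟨i, hi, ⟨⟨d, hd, hde⟩, hne⟩⟩
    exact ⟨d, hd, by simpa [hde] using hne, i, hi, hde.symm⟩
  · rintro ⟨d, hd, hne, i, hi, hie⟩
    exact ⟨i, hi, ⟨⟨d, hd, hie.symm⟩, by simpa [hie] using hne⟩⟩

-- ===== VERDICT (by name: the statement is the Claim_ definition above) =====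
theorem host_matches_py_spec : Claim_equal_host_matches_py := by
  intro host domains _
  unfold Spec_host_matches_py
  have : host_matches_py host domains = true ↔ host_matches_py_alt host domains = true := by
    unfold host_matches_py
    rw [loopA_iff, altB_iff]
    refine exists_congr fun d => and_congr_right fun _ => and_congr_right fun _ => ?_
    exact cand_iff (pvClean host) (pvClean d)
  cases ha : host_matches_py host domains <;> cases hb : host_matches_py_alt host domains <;> simp_all
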